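-- pv_equiv track=rewrite | github.com/lhaug/prog3_wi1819 | Python/python2019/onlinetest_uebung/a3.py | isHawaiian
-- ===== SOURCE A (Python) =====
-- def isHawaiian(w):
--     vokale = "AEIOUaeiou"
--     konstanten = "HKLMNPW'hklmnpw"
--     if w[-1] not in vokale:
--         return False
--     index = -1
--     for x in w:
--         index += 1
--         if x not in vokale and x not in konstanten:
--             return False
--         if x in konstanten:
--             next = (index+1)
--             if next < len(w):
--                 if w[next] == "'":
--                     return False
--                 if w[next] in konstanten:
--                     return False
--     return True
-- ===== SOURCE B (Python) =====
-- def isHawaiian(w):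
--     # A Hawaiian word is one or more syllables, each an optional consonant
--     # followed by a vowel: it matches the grammar (C? V)+.
--     vokale = "AEIOUaeiou"
--     konstanten = "HKLMNPW'hklmnpw"
--     i, n = 0, len(w)
--     if n == 0:
--         return False
--     while i < n:
--         if w[i] in konstanten:
--             i += 1
--         if i >= n or w[i] not in vokale:
--             return False
--         i += 1
--     return True
-- ===== Notes on version B (the rewrite author's own statement) =====
-- stated objective: alternative
-- what changed: B parses the word as the syllable grammar (optional consonant + vowel)+, consuming one or two characters per step; the last-vowel check, the alphabet check and the no-adjacent-consonants check of A all fall out of the grammar instead of being tested with an indexed lookahead loop.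
import Mathlib
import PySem

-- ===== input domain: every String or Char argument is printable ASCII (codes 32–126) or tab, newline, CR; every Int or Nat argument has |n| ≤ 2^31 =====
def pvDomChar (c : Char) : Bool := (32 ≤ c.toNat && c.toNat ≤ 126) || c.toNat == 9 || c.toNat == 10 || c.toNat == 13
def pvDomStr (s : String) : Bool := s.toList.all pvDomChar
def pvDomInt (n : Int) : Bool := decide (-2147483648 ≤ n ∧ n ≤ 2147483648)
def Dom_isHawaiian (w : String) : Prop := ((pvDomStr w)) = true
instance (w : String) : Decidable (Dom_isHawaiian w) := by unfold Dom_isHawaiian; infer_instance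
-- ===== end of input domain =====

-- B parses the word as the syllable grammar (optional consonant + vowel)+ instead of A's
-- indexed lookahead loop; return value only.

-- ===== PORT A =====
-- the characters of A's string constants vokale / konstanten (x in "…" is membership in its chars)
def pvVok : List Char := ['A','E','I','O','U','a','e','i','o','u']
def pvKon : List Char := ['H','K','L','M','N','P','W','\'','h','k','l','m','n','p','w']

-- A's for-loop: `index` tracks the position, lookahead `w[next]` reads the full list
def isHawaiianLoopA (full : List Char) : Int → List Char → Bool
  | _, [] => true
  | index, x :: rest =>
    let i := index + 1
    if !pvVok.contains x && !pvKon.contains x then false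
    else if pvKon.contains x then
      let next := i + 1
      if next < (full.length : Int) then
        match PySem.List.pyGet? full next with
        | some c =>
          if c == '\'' then false
          else if pvKon.contains c then false
          else isHawaiianLoopA full i rest
        | none => isHawaiianLoopA full i rest   -- unreachable: 0 ≤ next < len
      else isHawaiianLoopA full i rest
    else isHawaiianLoopA full i rest

def isHawaiian (w : String) : Bool :=
  let l := w.toList
  match PySem.List.pyGet? l (-1) with            -- w[-1]; none = IndexError, excluded by Pre_
  | none => false
  | some last =>
    if !pvVok.contains last then false
    else isHawaiianLoopA l (-1) l

-- ===== PORT B =====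
-- B's while loop consumes an optional consonant then a mandatory vowel per iteration;
-- ported as the recursion over the remaining characters (one- and two-step cases).
def pvParseSyl : List Char → Bool
  | [] => true
  | [x] =>
    if pvKon.contains x then false               -- consonant consumed, no vowel left
    else pvVok.contains x
  | x :: y :: rest =>
    if pvKon.contains x then
      if pvVok.contains y then pvParseSyl rest else false
    else
      if pvVok.contains x then pvParseSyl (y :: rest) else false

def isHawaiian_alt (w : String) : Bool :=
  match w.toList with
  | [] => false                                  -- n == 0
  | l => pvParseSyl l

-- ===== PRECONDITION & SPEC =====
-- Pre_ excludes only the empty string, on which Python A raises IndexError at w[-1].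
def Pre_isHawaiian (w : String) : Prop := w.toList ≠ []
instance (w : String) : Decidable (Pre_isHawaiian w) := by unfold Pre_isHawaiian; infer_instance
def pvWitness_isHawaiian : String := "aloha"

def Spec_isHawaiian (w : String) (out : Bool) : Prop := out = isHawaiian_alt w
instance (w : String) (out : Bool) : Decidable (Spec_isHawaiian w out) := by unfold Spec_isHawaiian; infer_instance

-- ===== CLAIM (what is proved, stated in full; the proofs are below) =====
def Claim_equal_isHawaiian : Prop := ∀ (w : String), Dom_isHawaiian w → Pre_isHawaiian w → Spec_isHawaiian w (isHawaiian w)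

-- ===== LEMMAS AND PROOFS =====

-- A's loop expressed as structural recursion on the remaining suffix
def pvSpecRest : List Char → Bool
  | [] => true
  | x :: rest =>
    if !pvVok.contains x && !pvKon.contains x then false
    else if pvKon.contains x then
      match rest with
      | [] => true
      | y :: _ =>
        if y == '\'' then false
        else if pvKon.contains y then false
        else pvSpecRest rest
    else pvSpecRest rest

-- last character is a vowel (vacuously true on [])
def pvLastV : List Char → Bool
  | [] => true
  | [x] => pvVok.contains x
  | _ :: y :: rest => pvLastV (y :: rest)

lemma loopA_cons (full : List Char) (index : Int) (x : Char) (rest : List Char) :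
    isHawaiianLoopA full index (x :: rest) =
      (if !pvVok.contains x && !pvKon.contains x then false
       else if pvKon.contains x then
         (if index + 1 + 1 < (full.length : Int) then
            match PySem.List.pyGet? full (index + 1 + 1) with
            | some c =>
              if c == '\'' then false
              else if pvKon.contains c then false
              else isHawaiianLoopA full (index + 1) rest
            | none => isHawaiianLoopA full (index + 1) rest
          else isHawaiianLoopA full (index + 1) rest)
       else isHawaiianLoopA full (index + 1) rest) := rfl

lemma pvSpecRest_cons2 (x y : Char) (rs : List Char) :
    pvSpecRest (x :: y :: rs) =
      (if !pvVok.contains x && !pvKon.contains x then false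
       else if pvKon.contains x then
         (if y == '\'' then false
          else if pvKon.contains y then false
          else pvSpecRest (y :: rs))
       else pvSpecRest (y :: rs)) := rfl

lemma isHawaiianLoopA_eq (rest : List Char) : ∀ (a : List Char),
    isHawaiianLoopA (a ++ rest) ((a.length : Int) - 1) rest = pvSpecRest rest := by
  induction rest with
  | nil => intro a; simp [isHawaiianLoopA, pvSpecRest]
  | cons x rs ih =>
    intro a
    have hrec : isHawaiianLoopA (a ++ x :: rs) ((a.length : Int) - 1 + 1) rs
        = pvSpecRest rs := by
      have := ih (a ++ [x])
      simpa [List.append_assoc] using this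
    cases rs with
    | nil =>
      rw [loopA_cons]
      have hlen : ¬ ((a.length : Int) - 1 + 1 + 1 < ((a ++ [x]).length : Int)) := by
        simp [List.length_append]
      rw [if_neg hlen, hrec]
      simp [pvSpecRest]
    | cons y rs' =>
      rw [loopA_cons, pvSpecRest_cons2]
      have hlen : ((a.length : Int) - 1 + 1 + 1 < ((a ++ x :: y :: rs').length : Int)) := by
        simp only [List.length_append, List.length_cons]; push_cast; omega
      have hget : PySem.List.pyGet? (a ++ x :: y :: rs') ((a.length : Int) - 1 + 1 + 1)
          = some y := by
        have h1 : (a.length : Int) - 1 + 1 + 1 = ((a.length + 1 : Nat) : Int) := by push_cast; ring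
        rw [h1, PySem.List.pyGet?_natCast]
        rw [List.getElem?_append_right (by omega)]
        simp
      rw [if_pos hlen, hget, hrec]

lemma vok_disj : ∀ c ∈ pvVok, c ∉ pvKon := by intro c hc; fin_cases hc <;> decide

-- the syllable parser equals A's loop body conjoined with "last char is a vowel"
lemma pvParseSyl_eq_aux : ∀ (n : Nat) (l : List Char), l.length ≤ n →
    pvParseSyl l = (pvSpecRest l && pvLastV l) := by
  intro n
  induction n with
  | zero =>
    intro l hl
    have : l = [] := List.eq_nil_of_length_eq_zero (Nat.le_zero.mp hl)
    subst this; rfl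
  | succ n ih =>
    intro l hl
    match l with
    | [] => rfl
    | [x] =>
      by_cases hk : x ∈ pvKon <;> by_cases hv : x ∈ pvVok
      · exact absurd hk (vok_disj x hv)
      · simp [pvParseSyl, pvSpecRest, pvLastV, hk, hv]
      · simp [pvParseSyl, pvSpecRest, pvLastV, hk, hv]
      · simp [pvParseSyl, pvSpecRest, pvLastV, hk, hv]
    | x :: y :: rest =>
      simp only [List.length_cons] at hl
      rw [pvSpecRest_cons2]
      by_cases hk : x ∈ pvKon
      · by_cases hvy : y ∈ pvVok
        · have hky : y ∉ pvKon := vok_disj y hvy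
          have hq : y ≠ '\'' := fun h => hky (h ▸ (by decide : '\'' ∈ pvKon))
          cases rest with
          | nil => simp [pvParseSyl, pvSpecRest, pvLastV, hk, hvy, hky, hq]
          | cons z rs =>
            have hih := ih (z :: rs) (by simp at hl ⊢; omega)
            have hsr : pvSpecRest (y :: z :: rs) = pvSpecRest (z :: rs) := by
              rw [pvSpecRest_cons2]; simp [hvy, hky]
            have hlv : pvLastV (x :: y :: z :: rs) = pvLastV (z :: rs) := rfl
            simp [pvParseSyl, hk, hvy, hky, hq, hih, hsr, pvLastV]
        · by_cases hky : y ∈ pvKon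
          · simp [pvParseSyl, hk, hvy, hky]
          · by_cases hq : y = '\''
            · subst hq; exact absurd (by decide : '\'' ∈ pvKon) hky
            · cases rest with
              | nil => simp [pvParseSyl, pvSpecRest, hk, hvy, hky, hq]
              | cons z rs =>
                have : pvSpecRest (y :: z :: rs) = false := by
                  rw [pvSpecRest_cons2]; simp [hvy, hky]
                simp [pvParseSyl, hk, hvy, hky, hq, this]
      · by_cases hvx : x ∈ pvVok
        · have hih := ih (y :: rest) (by simp at hl ⊢; omega)
          have hlv : pvLastV (x :: y :: rest) = pvLastV (y :: rest) := rfl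
          simp [pvParseSyl, hk, hvx, hih, hlv]
        · simp [pvParseSyl, hk, hvx]

lemma pvParseSyl_eq (l : List Char) : pvParseSyl l = (pvSpecRest l && pvLastV l) :=
  pvParseSyl_eq_aux l.length l le_rfl

lemma pvLastV_getLast : ∀ (l : List Char) (c : Char), l.getLast? = some c →
    pvLastV l = pvVok.contains c := by
  intro l
  induction l with
  | nil => intro c h; simp at h
  | cons x rest ih =>
    intro c h
    cases rest with
    | nil => simp at h; simp [pvLastV, h]
    | cons y rs =>
      have : (y :: rs).getLast? = some c := by
        rwa [List.getLast?_cons_cons] at h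
      exact ih c this

-- ===== VERDICT (by name: the statement is the Claim_ definition above) =====
theorem isHawaiian_spec : Claim_equal_isHawaiian := by
  intro w _ hpre
  unfold Pre_isHawaiian at hpre
  unfold Spec_isHawaiian
  obtain ⟨x, rest, hl⟩ : ∃ x rest, w.toList = x :: rest := by
    cases h : w.toList with
    | nil => exact absurd h hpre
    | cons a b => exact ⟨a, b, rfl⟩
  have hmain : isHawaiianLoopA (x :: rest) (-1) (x :: rest) = pvSpecRest (x :: rest) := by
    have h := isHawaiianLoopA_eq (x :: rest) []
    simpa using h
  simp only [isHawaiian, isHawaiian_alt, hl, PySem.List.pyGet?_neg_one]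
  cases hg : (x :: rest).getLast? with
  | none => simp at hg
  | some last =>
    have hlv := pvLastV_getLast (x :: rest) last hg
    simp only [hmain, pvParseSyl_eq, hlv]
    cases hc : pvVok.contains last <;> simp
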